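-- pv_equiv track=rewrite | github.com/Count-group/project1 | results/codes/算法竞赛/doubao/CF2071F_3.py | can_make_p_towering
-- ===== SOURCE A (Python) =====
-- def can_make_p_towering(arr, p, k):
--     n = len(arr)
--     for center in range(n):
--         remove_count = 0
--         for i in range(n):
--             # 计算当前位置所需的最小元素值
--             required = p - abs(center - i)
--             if arr[i] < required:
--                 remove_count += 1
--                 if remove_count > k:
--                     break
--         else:
--             return True
--     return False
-- ===== SOURCE B (Python) =====
-- def can_make_p_towering(arr, p, k):
--     # Difference-array sweep: position i must be removed for center c iff
--     # arr[i] < p - |c - i|, i.e. iff c lies in the open interval (i - d, i + d)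
--     # with d = p - arr[i] > 0.  Mark each such interval once; a single
--     # prefix-sum pass then gives every center's removal count.
--     n = len(arr)
--     diff = [0] * (n + 1)
--     for i, a in enumerate(arr):
--         d = p - a
--         if d > 0:
--             diff[max(0, i - d + 1)] += 1
--             diff[min(n, i + d)] -= 1
--     cur = 0
--     for c in range(n):
--         cur += diff[c]
--         if cur <= k:
--             return True
--     return False
-- ===== Notes on version B (the rewrite author's own statement) =====
-- stated objective: alternative
-- what changed: Replaced A's per-center rescan of the whole array by a difference-array sweep: each position contributes one interval of centers it forces out, marked once, and a single prefix-sum pass over centers finds one whose removal count is at most k.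
-- intended difference: On inputs with a negative removal budget k where some center already needs zero removals, A returns True (it only checks the budget after incrementing the count) while B returns False, the intended answer since no count can be <= a negative k. — e.g. on can_make_p_towering([5], 0, -1): A returns true, B returns false
import Mathlib
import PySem

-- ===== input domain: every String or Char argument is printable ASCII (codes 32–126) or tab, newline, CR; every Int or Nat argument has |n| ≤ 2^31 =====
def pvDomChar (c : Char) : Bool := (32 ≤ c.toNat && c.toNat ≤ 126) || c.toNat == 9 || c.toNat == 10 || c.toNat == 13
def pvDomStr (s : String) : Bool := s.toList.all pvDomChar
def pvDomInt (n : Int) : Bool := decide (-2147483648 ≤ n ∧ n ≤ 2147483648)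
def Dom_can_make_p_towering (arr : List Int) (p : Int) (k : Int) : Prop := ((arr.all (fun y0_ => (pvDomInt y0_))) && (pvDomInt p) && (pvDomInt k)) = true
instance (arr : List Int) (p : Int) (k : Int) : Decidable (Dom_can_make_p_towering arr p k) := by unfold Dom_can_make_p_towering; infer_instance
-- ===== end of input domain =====

-- B replaces A's per-center rescan by a single difference-array sweep over the centers (alternative algorithm).

-- ===== PORT A =====
-- inner `for i in range(n)` loop of A, walking the array with index i and the
-- running remove_count rc; returns true iff the loop finishes without `break`
def pvInnerA (p k c : Int) : List Int → Int → Int → Bool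
  | [], _, _ => true
  | a :: rest, i, rc =>
    if a < p - ((c - i).natAbs : Int) then
      if rc + 1 > k then false            -- `break`: the for-else clause is skipped
      else pvInnerA p k c rest (i + 1) (rc + 1)
    else pvInnerA p k c rest (i + 1) rc

def can_make_p_towering (arr : List Int) (p : Int) (k : Int) : Bool :=
  (List.range arr.length).any (fun center => pvInnerA p k (center : Int) arr 0 0)

-- ===== PORT B =====
-- first loop of B: mark each interval (i-d, i+d) in the difference array
def pvBuildB (p : Int) (n : Nat) : List Int → Int → List Int → List Int
  | [], _, diff => diff
  | a :: rest, i, diff =>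
    let d := p - a
    if d > 0 then
      let lo := (max 0 (i - d + 1)).toNat
      let hi := (min (n : Int) (i + d)).toNat
      let diff1 := diff.set lo (diff.getD lo 0 + 1)
      let diff2 := diff1.set hi (diff1.getD hi 0 + (-1))
      pvBuildB p n rest (i + 1) diff2
    else pvBuildB p n rest (i + 1) diff

-- second loop of B: prefix-sum sweep over diff[0..n-1] with running count cur
def pvScanB (k : Int) : List Int → Int → Bool
  | [], _ => false
  | d :: rest, cur =>
    if cur + d ≤ k then true
    else pvScanB k rest (cur + d)

def can_make_p_towering_alt (arr : List Int) (p : Int) (k : Int) : Bool :=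
  let n := arr.length
  let diff := pvBuildB p n arr 0 (List.replicate (n + 1) 0)
  pvScanB k (diff.take n) 0

-- ===== PRECONDITION & SPEC =====
-- On inputs with a negative removal budget k where some center already needs zero removals,
-- A returns True (it only checks the budget after incrementing the count) while B returns
-- False, the intended answer since no count can be ≤ a negative k.
def D_can_make_p_towering (arr : List Int) (p : Int) (k : Int) : Prop :=
  k < 0 ∧ ∃ c ∈ List.range arr.length, ∀ i ∈ List.range arr.length,
    p - ((c : Int) - (i : Int)).natAbs ≤ arr.getD i 0
instance (arr : List Int) (p : Int) (k : Int) : Decidable (D_can_make_p_towering arr p k) := by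
  unfold D_can_make_p_towering; infer_instance

def Spec_can_make_p_towering (arr : List Int) (p : Int) (k : Int) (out : Bool) : Prop :=
  ¬ D_can_make_p_towering arr p k → out = can_make_p_towering_alt arr p k
instance (arr : List Int) (p : Int) (k : Int) (out : Bool) : Decidable (Spec_can_make_p_towering arr p k out) := by unfold Spec_can_make_p_towering; infer_instance

def pvDiffWitness_can_make_p_towering : List Int × Int × Int := ([5], 0, -1)
def pvDiffWitnessOut_can_make_p_towering : Bool × Bool := (true, false)

-- ===== CLAIM (what is proved, stated in full; the proofs are below) =====
def Claim_unchanged_can_make_p_towering : Prop := ∀ (arr : List Int) (p : Int) (k : Int), Dom_can_make_p_towering arr p k → Spec_can_make_p_towering arr p k (can_make_p_towering arr p k)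
def Claim_changed_can_make_p_towering : Prop := Dom_can_make_p_towering (pvDiffWitness_can_make_p_towering.1) (pvDiffWitness_can_make_p_towering.2.1) (pvDiffWitness_can_make_p_towering.2.2) ∧ D_can_make_p_towering (pvDiffWitness_can_make_p_towering.1) (pvDiffWitness_can_make_p_towering.2.1) (pvDiffWitness_can_make_p_towering.2.2) ∧ can_make_p_towering (pvDiffWitness_can_make_p_towering.1) (pvDiffWitness_can_make_p_towering.2.1) (pvDiffWitness_can_make_p_towering.2.2) = pvDiffWitnessOut_can_make_p_towering.1 ∧ can_make_p_towering_alt (pvDiffWitness_can_make_p_towering.1) (pvDiffWitness_can_make_p_towering.2.1) (pvDiffWitness_can_make_p_towering.2.2) = pvDiffWitnessOut_can_make_p_towering.2 ∧ pvDiffWitnessOut_can_make_p_towering.1 ≠ pvDiffWitnessOut_can_make_p_towering.2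
def Claim_exact_can_make_p_towering : Prop := ∀ (arr : List Int) (p : Int) (k : Int), Dom_can_make_p_towering arr p k → D_can_make_p_towering arr p k → can_make_p_towering arr p k ≠ can_make_p_towering_alt arr p k

-- ===== LEMMAS AND PROOFS =====

-- removal count of center c over the suffix starting at index i
def pvCnt (p c : Int) : List Int → Int → Int
  | [], _ => 0
  | a :: rest, i =>
    (if a < p - ((c - i).natAbs : Int) then 1 else 0) + pvCnt p c rest (i + 1)

lemma pvCnt_nonneg (p c : Int) (l : List Int) (i : Int) : 0 ≤ pvCnt p c l i := by
  induction l generalizing i with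
  | nil => simp [pvCnt]
  | cons a rest ih =>
    simp only [pvCnt]
    have := ih (i + 1)
    split <;> omega

-- A's inner loop returns true iff the removal count is ≤ k or is 0
lemma pvInnerA_iff (p k c : Int) (l : List Int) (i rc : Int) :
    pvInnerA p k c l i rc = true ↔
      (rc + pvCnt p c l i ≤ k ∨ pvCnt p c l i = 0) := by
  induction l generalizing i rc with
  | nil => simp [pvInnerA, pvCnt]
  | cons a rest ih =>
    simp only [pvInnerA, pvCnt]
    have hnn := pvCnt_nonneg p c rest (i + 1)
    split
    · split
      · simp only [Bool.false_eq_true, false_iff]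
        omega
      · rw [ih]
        omega
    · rw [ih]
      omega

-- signed contribution of the suffix to the prefix sum diff[0..m-1]
def pvIvl (p : Int) (n : Nat) (m : Int) : List Int → Int → Int
  | [], _ => 0
  | a :: rest, i =>
    (if p - a > 0 then
      (if max 0 (i - (p - a) + 1) < m then 1 else 0)
        - (if min (n : Int) (i + (p - a)) < m then 1 else 0)
     else 0) + pvIvl p n m rest (i + 1)

lemma sum_take_set (l : List Int) (j : Nat) (v : Int) (m : Nat) (hj : j < l.length) :
    ((l.set j (l.getD j 0 + v)).take m).sum
      = (l.take m).sum + if j < m then v else 0 := by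
  induction l generalizing j m with
  | nil => simp at hj
  | cons x xs ih =>
    cases j with
    | zero =>
      cases m with
      | zero => simp
      | succ m' => simp [List.set, List.take]; ring
    | succ j' =>
      cases m with
      | zero => simp
      | succ m' =>
        simp only [List.set, List.take, List.sum_cons, List.getD_cons_succ]
        rw [ih j' m' (by simpa using hj)]
        have h : (j' + 1 < m' + 1) ↔ (j' < m') := by omega
        simp only [h]
        ring

lemma pvBuildB_sum (p : Int) (n : Nat) (l : List Int) (i : Int) (diff : List Int) (m : Nat)
    (hi : 0 ≤ i) (hlen : i + l.length ≤ (n : Int)) (hd : diff.length = n + 1) :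
    ((pvBuildB p n l i diff).take m).sum = (diff.take m).sum + pvIvl p n (m : Int) l i := by
  induction l generalizing i diff with
  | nil => simp [pvBuildB, pvIvl]
  | cons a rest ih =>
    simp only [pvBuildB, pvIvl]
    simp only [List.length_cons] at hlen
    push_cast at hlen
    by_cases hdp : p - a > 0
    · simp only [if_pos hdp]
      set lo := (max 0 (i - (p - a) + 1)).toNat with hlo
      set hi2 := (min (n : Int) (i + (p - a))).toNat with hhi
      have hlo_lt : lo < diff.length := by rw [hd]; omega
      have hset1 : (diff.set lo (diff.getD lo 0 + 1)).length = n + 1 := by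
        simp [hd]
      have hhi_lt : hi2 < (diff.set lo (diff.getD lo 0 + 1)).length := by
        rw [hset1]; omega
      rw [ih (i + 1) _ (by omega) (by omega) (by simpa using hset1)]
      rw [sum_take_set _ _ _ _ hhi_lt, sum_take_set _ _ _ _ hlo_lt]
      have h1 : (lo < m) ↔ (max 0 (i - (p - a) + 1) < (m : Int)) := by omega
      have h2 : (hi2 < m) ↔ (min (n : Int) (i + (p - a)) < (m : Int)) := by omega
      simp only [h1, h2]
      split <;> split <;> ring
    · simp only [if_neg hdp]
      rw [ih (i + 1) diff (by omega) (by omega) hd]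
      ring

-- for a center c ∈ [0,n), the per-prefix contribution equals the removal count
lemma pvIvl_eq_cnt (p : Int) (n : Nat) (c : Int) (l : List Int) (i : Int)
    (hc0 : 0 ≤ c) (hcn : c < (n : Int)) :
    pvIvl p n (c + 1) l i = pvCnt p c l i := by
  induction l generalizing i with
  | nil => simp [pvIvl, pvCnt]
  | cons a rest ih =>
    simp only [pvIvl, pvCnt, ih (i + 1)]
    congr 1
    split_ifs <;> omega

lemma pvScanB_iff (k : Int) (ds : List Int) (cur : Int) :
    pvScanB k ds cur = true ↔
      ∃ j : Nat, j < ds.length ∧ cur + (ds.take (j + 1)).sum ≤ k := by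
  induction ds generalizing cur with
  | nil => simp [pvScanB]
  | cons d rest ih =>
    simp only [pvScanB]
    split
    · simp only [true_iff]
      exact ⟨0, by simpa using ‹cur + d ≤ k›⟩
    · rw [ih]
      constructor
      · rintro ⟨j, hj, hsum⟩
        exact ⟨j + 1, by simpa using hj, by simpa [List.take, add_assoc] using hsum⟩
      · rintro ⟨j, hj, hsum⟩
        cases j with
        | zero =>
          simp only [List.take, List.sum_cons, List.sum_nil, add_zero] at hsum
          exact absurd hsum ‹¬(cur + d ≤ k)›
        | succ j' =>
          exact ⟨j', by simpa using hj, by simpa [List.take, add_assoc] using hsum⟩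

lemma sum_take_replicate_zero (n m : Nat) : (((List.replicate n (0 : Int)).take m)).sum = 0 := by
  rw [List.take_replicate]
  simp

lemma pvBuildB_length (p : Int) (n : Nat) (l : List Int) (i : Int) (diff : List Int) :
    (pvBuildB p n l i diff).length = diff.length := by
  induction l generalizing i diff with
  | nil => simp [pvBuildB]
  | cons a rest ih =>
    simp only [pvBuildB]
    split
    · rw [ih]; simp
    · rw [ih]

-- main characterisation of B
lemma alt_iff (arr : List Int) (p k : Int) :
    can_make_p_towering_alt arr p k = true ↔
      ∃ c : Nat, c < arr.length ∧ pvCnt p (c : Int) arr 0 ≤ k := by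
  unfold can_make_p_towering_alt
  rw [pvScanB_iff]
  have hlen : (pvBuildB p arr.length arr 0 (List.replicate (arr.length + 1) 0)).length
      = arr.length + 1 := by rw [pvBuildB_length]; simp
  constructor
  · rintro ⟨j, hj, hsum⟩
    rw [List.length_take, hlen] at hj
    have hjn : j < arr.length := by omega
    rw [List.take_take, min_eq_left (by omega)] at hsum
    rw [pvBuildB_sum p arr.length arr 0 _ (j + 1) le_rfl (by simp) (by simp),
        sum_take_replicate_zero] at hsum
    refine ⟨j, hjn, ?_⟩
    have hcast : ((j + 1 : Nat) : Int) = (j : Int) + 1 := by push_cast; ring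
    rw [hcast, pvIvl_eq_cnt p arr.length (j : Int) arr 0 (by positivity) (by exact_mod_cast hjn)]
        at hsum
    simpa using hsum
  · rintro ⟨c, hc, hcnt⟩
    refine ⟨c, ?_, ?_⟩
    · rw [List.length_take, hlen]; omega
    · rw [List.take_take, min_eq_left (by omega)]
      rw [pvBuildB_sum p arr.length arr 0 _ (c + 1) le_rfl (by simp) (by simp),
          sum_take_replicate_zero]
      have hcast : ((c + 1 : Nat) : Int) = (c : Int) + 1 := by push_cast; ring
      rw [hcast, pvIvl_eq_cnt p arr.length (c : Int) arr 0 (by positivity) (by exact_mod_cast hc)]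
      simpa using hcnt

-- main characterisation of A
lemma a_iff (arr : List Int) (p k : Int) :
    can_make_p_towering arr p k = true ↔
      ∃ c : Nat, c < arr.length ∧
        (pvCnt p (c : Int) arr 0 ≤ k ∨ pvCnt p (c : Int) arr 0 = 0) := by
  unfold can_make_p_towering
  rw [List.any_eq_true]
  constructor
  · rintro ⟨c, hc, hinner⟩
    rw [List.mem_range] at hc
    rw [pvInnerA_iff] at hinner
    exact ⟨c, hc, by simpa using hinner⟩
  · rintro ⟨c, hc, hcnt⟩
    exact ⟨c, List.mem_range.mpr hc, by rw [pvInnerA_iff]; simpa using hcnt⟩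

-- pvCnt = 0 iff no position of the suffix is below its required value
lemma pvCnt_eq_zero_iff (p c : Int) (l : List Int) (i : Int) :
    pvCnt p c l i = 0 ↔
      ∀ j ∈ List.range l.length, p - ((c - (i + (j : Int))).natAbs : Int) ≤ l.getD j 0 := by
  induction l generalizing i with
  | nil => simp [pvCnt]
  | cons a rest ih =>
    have hnn := pvCnt_nonneg p c rest (i + 1)
    simp only [pvCnt, List.length_cons]
    constructor
    · intro h j hj
      rw [List.mem_range] at hj
      have hhead : ¬ a < p - ((c - i).natAbs : Int) := by
        by_contra hcon
        rw [if_pos hcon] at h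
        omega
      cases j with
      | zero => simpa using not_lt.mp hhead
      | succ j' =>
        have hrest : pvCnt p c rest (i + 1) = 0 := by
          split at h <;> omega
        have := (ih (i + 1)).mp hrest j' (List.mem_range.mpr (by omega))
        simp only [List.getD_cons_succ]
        have hc : c - (i + 1 + (j' : Int)) = c - (i + ((j' + 1 : Nat) : Int)) := by
          push_cast; ring
        rw [← hc]
        exact this
    · intro h
      have hhead := h 0 (List.mem_range.mpr (by omega))
      simp only [List.getD_cons_zero] at hhead
      have h0 : ¬ a < p - ((c - i).natAbs : Int) := by
        simp only [Int.add_zero, Nat.cast_zero] at hhead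
        omega
      rw [if_neg h0]
      have hrest : pvCnt p c rest (i + 1) = 0 := by
        rw [ih (i + 1)]
        intro j hj
        rw [List.mem_range] at hj
        have := h (j + 1) (List.mem_range.mpr (by omega))
        simp only [List.getD_cons_succ] at this
        have hc : c - (i + 1 + (j : Int)) = c - (i + ((j + 1 : Nat) : Int)) := by
          push_cast; ring
        rw [hc]
        exact this
      omega

-- D_ holds (given k < 0) iff some center's count is zero
lemma D_iff_zero (arr : List Int) (p k : Int) (hk : k < 0) :
    D_can_make_p_towering arr p k ↔
      ∃ c : Nat, c < arr.length ∧ pvCnt p (c : Int) arr 0 = 0 := by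
  unfold D_can_make_p_towering
  simp only [hk, true_and]
  constructor
  · rintro ⟨c, hc, hall⟩
    rw [List.mem_range] at hc
    refine ⟨c, hc, ?_⟩
    rw [pvCnt_eq_zero_iff]
    intro j hj
    have := hall j hj
    simpa using this
  · rintro ⟨c, hc, hz⟩
    refine ⟨c, List.mem_range.mpr hc, ?_⟩
    intro j hj
    have := (pvCnt_eq_zero_iff p (c : Int) arr 0).mp hz j hj
    simpa using this

-- ===== VERDICT (by name: the statements are the Claim_ definitions above) =====
theorem can_make_p_towering_spec : Claim_unchanged_can_make_p_towering := by
  intro arr p k _ hD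
  rw [Bool.eq_iff_iff, a_iff, alt_iff]
  constructor
  · rintro ⟨c, hc, hcnt⟩
    rcases hcnt with h | h
    · exact ⟨c, hc, h⟩
    · by_cases hk : k < 0
      · exact absurd ((D_iff_zero arr p k hk).mpr ⟨c, hc, h⟩) hD
      · exact ⟨c, hc, by omega⟩
  · rintro ⟨c, hc, h⟩
    exact ⟨c, hc, Or.inl h⟩

theorem can_make_p_towering_changed : Claim_changed_can_make_p_towering := by
  unfold Claim_changed_can_make_p_towering; decide

theorem can_make_p_towering_tight : Claim_exact_can_make_p_towering := by
  intro arr p k _ hD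
  have hk : k < 0 := hD.1
  obtain ⟨c, hc, hz⟩ := (D_iff_zero arr p k hk).mp hD
  have hA : can_make_p_towering arr p k = true := by
    rw [a_iff]; exact ⟨c, hc, Or.inr hz⟩
  have hB : can_make_p_towering_alt arr p k = false := by
    by_contra hcon
    rw [Bool.not_eq_false, alt_iff] at hcon
    obtain ⟨c', _, hle⟩ := hcon
    have := pvCnt_nonneg p (c' : Int) arr 0
    omega
  rw [hA, hB]; simp
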